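-- pv_equiv track=rewrite | github.com/Arvo-AI/aurora | server/routes/terraform/terraform_generator.py | _fix_service_references
-- ===== SOURCE A (Python) =====
-- from typing import Dict, Any, Optional, Tuple, List
--
-- def _fix_service_references(value: str, all_services: Dict, app_name: str) -> str:
--     """Fix bare service name references to use fully qualified DNS names."""
--     fixed_value = value
--
--     for svc_name in all_services.keys():
--         # Look for service names in URLs or connection strings
--         patterns = [
--             f"://{svc_name}:",  # redis://redis:6379
--             f"http://{svc_name}:",  # http://api-service:4000
--             f"https://{svc_name}:",  # https://api-service:4000
--         ]
--
--         for pattern in patterns: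
--             if pattern in fixed_value:
--                 fixed_pattern = pattern.replace(f"://{svc_name}:", f"://{svc_name}.{app_name}.local:")
--                 fixed_value = fixed_value.replace(pattern, fixed_pattern)
--
--     return fixed_value
-- ===== SOURCE B (Python) =====
-- import re
--
-- # One compiled regex pass: match '://name' (name colon-free) followed by ':' (lookahead,
-- # so the colon can begin the next match) and qualify name when it is a known service.
-- _URL_NAME = re.compile(r'://([^:]*)(?=:)')
--
-- def _fix_service_references(value: str, all_services, app_name: str) -> str:
--     """Fix bare service name references to use fully qualified DNS names."""
--     names = set(all_services.keys())
--     suffix = "." + app_name + ".local"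
--     def repl(m):
--         name = m.group(1)
--         return "://" + name + suffix if name in names else m.group(0)
--     return _URL_NAME.sub(repl, value)
-- ===== Notes on version B (the rewrite author's own statement) =====
-- stated objective: faster
-- what changed: Instead of one string scan-and-replace pass per service key (with two further dead 'http(s)' pattern passes each), B makes a single compiled-regex pass over the value, matching '://name' before a ':' and qualifying the name via one set lookup.
-- outside the precondition, e.g. on _fix_service_references('u://a:b:9', {'a:b': 's'}, 'm'): A returns 'u://a:b.m.local:9', B returns 'u://a:b:9'
import Mathlib
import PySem

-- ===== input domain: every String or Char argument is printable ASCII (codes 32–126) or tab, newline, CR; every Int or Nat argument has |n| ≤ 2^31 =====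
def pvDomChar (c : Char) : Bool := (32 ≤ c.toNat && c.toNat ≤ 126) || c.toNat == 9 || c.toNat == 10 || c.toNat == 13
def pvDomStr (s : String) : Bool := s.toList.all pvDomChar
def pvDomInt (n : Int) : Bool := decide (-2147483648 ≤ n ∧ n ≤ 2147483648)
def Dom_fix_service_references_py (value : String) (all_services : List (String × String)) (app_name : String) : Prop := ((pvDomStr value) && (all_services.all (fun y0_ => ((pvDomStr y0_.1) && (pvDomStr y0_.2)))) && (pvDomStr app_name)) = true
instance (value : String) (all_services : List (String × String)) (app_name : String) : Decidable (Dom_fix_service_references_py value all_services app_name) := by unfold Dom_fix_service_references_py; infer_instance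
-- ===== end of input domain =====

-- B is a single scan over the value (the port of Source B's one compiled-regex pass) instead of
-- A's one replace pass per service key; equivalence is proved on Pre_, which excludes
-- delimiter-bearing names and overlapping-match corners where the two are both defensible.

-- ===== PORT A =====
-- Literal transliteration of A: for each dict key, three candidate patterns, each
-- conditionally replaced ('in' test, then str.replace) on the evolving string.
def fix_service_references_py (value : String) (all_services : List (String × String)) (app_name : String) : String :=
  let fixed_value := value
  ((PySem.Dict.ofList all_services).keys).foldl (fun fixed_value svc_name =>
    let patterns : List String :=
      ["://" ++ svc_name ++ ":", "http://" ++ svc_name ++ ":", "https://" ++ svc_name ++ ":"]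
    patterns.foldl (fun fixed_value pattern =>
      if PySem.Str.isIn pattern fixed_value then
        let fixed_pattern := PySem.Str.replace pattern ("://" ++ svc_name ++ ":") ("://" ++ svc_name ++ "." ++ app_name ++ ".local:")
        PySem.Str.replace fixed_value pattern fixed_pattern
      else fixed_value) fixed_value) fixed_value

-- ===== PORT B =====
-- Hand port (exact) of Source B's re.sub scan for the pattern '://([^:]*)(?=:)': walk the
-- string left to right; at '://', the name is everything up to the next ':' (which is NOT
-- consumed, so it can begin the next match); qualify the name if it is a known service,
-- otherwise keep scanning one character further.
def pvScan (P : List (List Char)) (sfx : List Char) (l : List Char) : List Char :=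
  match l with
  | [] => []
  | c :: t =>
    if _hpre : [':', '/', '/'] <+: (c :: t) then
      let t3 := t.drop 2
      let j := PySem.Chars.find t3 [':']
      if 0 ≤ j ∧ t3.take j.toNat ∈ P then
        ':' :: '/' :: '/' :: ((t3.take j.toNat ++ sfx) ++ pvScan P sfx (t3.drop j.toNat))
      else c :: pvScan P sfx t
    else c :: pvScan P sfx t
termination_by l.length
decreasing_by
  · simp only [List.length_cons, List.length_drop]; omega
  · simp only [List.length_cons]; omega
  · simp only [List.length_cons]; omega

def fix_service_references_py_alt (value : String) (all_services : List (String × String)) (app_name : String) : String :=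
  let names := PySem.Set.ofList ((PySem.Dict.ofList all_services).keys)
  let suffix := "." ++ app_name ++ ".local"
  String.ofList (pvScan (names.map String.toList) suffix.toList value.toList)

-- ===== PRECONDITION & SPEC =====
-- Pre_ excludes corner families on which A still returns a value but where A's result is
-- an accident of its per-key substring replacement: a service name containing ':' whose
-- colon-free head appears as a URL host in the value (A's pattern then fires inside
-- 'host:port' text) or which contains '.' + app_name + '.local' (A can then match text
-- produced by its own earlier replacement); and, unless no service name occurs as a URL
-- host at all, an app_name containing ':', a service name equal to another name + '.' +
-- app_name + '.local' (re-qualification depending solely on dict insertion order), and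
-- values containing '://k1://k2:' for service names k1, k2 (overlapping matches sharing
-- one ':', where A's non-overlapping replace order makes the outcome accidental).
def Pre_fix_service_references_py (value : String) (all_services : List (String × String)) (app_name : String) : Prop :=
  (∀ k ∈ all_services.map Prod.fst, ':' ∈ k.toList →
      PySem.Str.isIn ("://" ++ String.ofList (k.toList.takeWhile (· ≠ ':')) ++ ":") value = false ∧
      PySem.Str.isIn ("." ++ app_name ++ ".local") k = false) ∧
  ((':' ∉ app_name.toList ∧
    (∀ k1 ∈ all_services.map Prod.fst, ':' ∉ k1.toList →
      ∀ k2 ∈ all_services.map Prod.fst, ':' ∉ k2.toList →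
        k2 ≠ k1 ++ "." ++ app_name ++ ".local" ∧
        PySem.Str.isIn ("://" ++ k1 ++ "://" ++ k2 ++ ":") value = false)) ∨
   (∀ k ∈ all_services.map Prod.fst, ':' ∉ k.toList →
      PySem.Str.isIn ("://" ++ k ++ ":") value = false))
instance (value : String) (all_services : List (String × String)) (app_name : String) : Decidable (Pre_fix_service_references_py value all_services app_name) := by unfold Pre_fix_service_references_py; infer_instance

def pvWitness_fix_service_references_py : String × (List (String × String)) × String :=
  ("redis://redis:6379", [("redis", "svc")], "myapp")

def Spec_fix_service_references_py (value : String) (all_services : List (String × String)) (app_name : String) (out : String) : Prop := out = fix_service_references_py_alt value all_services app_name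
instance (value : String) (all_services : List (String × String)) (app_name : String) (out : String) : Decidable (Spec_fix_service_references_py value all_services app_name out) := by unfold Spec_fix_service_references_py; infer_instance

-- ===== CLAIM (what is proved, stated in full; the proofs are below) =====
def Claim_equal_fix_service_references_py : Prop := ∀ (value : String) (all_services : List (String × String)) (app_name : String), Dom_fix_service_references_py value all_services app_name → Pre_fix_service_references_py value all_services app_name → Spec_fix_service_references_py value all_services app_name (fix_service_references_py value all_services app_name)

-- ===== LEMMAS AND PROOFS =====

-- Abbreviations for the character-level strings involved.
def pvSfx (app : List Char) : List Char := ['.'] ++ app ++ ['.', 'l', 'o', 'c', 'a', 'l']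
def pvPat (k : List Char) : List Char := [':', '/', '/'] ++ k ++ [':']
def pvQual (app k : List Char) : List Char := [':', '/', '/'] ++ k ++ pvSfx app ++ [':']
def pvShared (k1 k2 : List Char) : List Char := [':', '/', '/'] ++ k1 ++ ([':', '/', '/'] ++ k2 ++ [':'])

-- Structural version of CPython str.replace for a nonempty pattern ':' :: os.
def pvRep (os new : List Char) (l : List Char) : List Char :=
  if h : (':' :: os) <+: l then
    new ++ pvRep os new (l.drop (os.length + 1))
  else
    match l with
    | [] => []
    | c :: t => c :: pvRep os new t
termination_by l.length
decreasing_by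
  · have hne : l ≠ [] := by rintro rfl; exact (List.cons_ne_nil _ _) (List.prefix_nil.mp h)
    cases l with
    | nil => exact absurd rfl hne
    | cons a t => simp only [List.length_cons, List.length_drop]; omega
  · simp only [List.length_cons]; omega

-- Context hypotheses derived from Pre_ (character level).
def pvCtx (app : List Char) (K : List (List Char)) : Prop :=
  ':' ∉ app ∧ (∀ k ∈ K, ':' ∉ k) ∧
  (∀ k1 ∈ K, ∀ k2 ∈ K, k2 ≠ k1 ++ pvSfx app)

def pvNoSh (K : List (List Char)) (cs : List Char) : Prop :=
  ∀ k1 ∈ K, ∀ k2 ∈ K, ¬ pvShared k1 k2 <:+: cs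

-- ---- pvRep equations and bridge to PySem.Chars.replace ----
theorem pvRep_nil (os new : List Char) : pvRep os new [] = [] := by
  rw [pvRep]; simp [List.prefix_nil]

theorem pvRep_pos (os new l : List Char) (h : (':' :: os) <+: l) :
    pvRep os new l = new ++ pvRep os new (l.drop (os.length + 1)) := by
  rw [pvRep]; simp [h]

theorem pvRep_neg_cons (os new : List Char) (c : Char) (t : List Char)
    (h : ¬ (':' :: os) <+: (c :: t)) : pvRep os new (c :: t) = c :: pvRep os new t := by
  rw [pvRep]; simp [h]

theorem pvReplaceGo_eq_pvRep (os new : List Char) :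
    ∀ (fuel : Nat) (l acc : List Char), l.length ≤ fuel →
      PySem.Chars.replace.go (':' :: os) new fuel l acc = acc.reverse ++ pvRep os new l := by
  intro fuel
  induction fuel with
  | zero =>
    intro l acc hl
    have : l = [] := List.eq_nil_of_length_eq_zero (Nat.le_zero.mp hl)
    subst this
    simp [PySem.Chars.replace.go, pvRep_nil]
  | succ fuel ih =>
    intro l acc hl
    cases l with
    | nil => simp [PySem.Chars.replace.go, pvRep_nil]
    | cons c t =>
      rw [PySem.Chars.replace.go]
      by_cases hpre : (':' :: os) <+: (c :: t)
      · have hb : (':' :: os).isPrefixOf (c :: t) = true := List.isPrefixOf_iff_prefix.mpr hpre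
        simp only [hb, if_true]
        have hlen : ((c :: t).drop ((':' :: os).length)).length ≤ fuel := by
          simp only [List.length_drop, List.length_cons] at *
          omega
        rw [ih _ _ hlen]
        rw [pvRep_pos os new _ hpre]
        simp [List.length_cons]
      · have hb : (':' :: os).isPrefixOf (c :: t) = false := by
          rw [← Bool.not_eq_true, List.isPrefixOf_iff_prefix]; exact hpre
        simp only [hb, if_false, Bool.false_eq_true]
        have hlen : t.length ≤ fuel := by simp at hl; omega
        rw [ih _ _ hlen, pvRep_neg_cons os new c t hpre]
        simp

theorem pvReplace_eq_pvRep (os new l : List Char) :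
    PySem.Chars.replace l (':' :: os) new = pvRep os new l := by
  rw [PySem.Chars.replace]
  simp only [List.isEmpty_cons, Bool.false_eq_true, if_false]
  exact (pvReplaceGo_eq_pvRep os new l.length l [] le_rfl).trans (by simp)

-- find on [':'] decomposes the string.
theorem pvFind_neg (t : List Char) (h : ¬ 0 ≤ PySem.Chars.find t [':']) : ':' ∉ t := by
  have hge := PySem.Chars.neg_one_le_find t [':']
  have heq : PySem.Chars.find t [':'] = -1 := by omega
  have hni := (PySem.Chars.find_eq_neg_one_iff t [':']).mp heq
  intro hm
  obtain ⟨u, v, huv⟩ := List.append_of_mem hm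
  exact hni ⟨u, v, by rw [huv]; simp⟩

theorem pvFind_pos (t : List Char) (h : 0 ≤ PySem.Chars.find t [':']) :
    ':' ∉ t.take (PySem.Chars.find t [':']).toNat ∧
    ∃ r, t.drop (PySem.Chars.find t [':']).toNat = ':' :: r := by
  obtain ⟨hpre, hmin⟩ := PySem.Chars.find_spec (s := t) (sub := [':']) h
  constructor
  · intro hm
    obtain ⟨i, hi, hgi⟩ := List.mem_iff_getElem.mp hm
    have hi' : i < (PySem.Chars.find t [':']).toNat ∧ i < t.length := by
      simp only [List.length_take, lt_min_iff] at hi; exact hi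
    apply hmin i hi'.1
    rw [List.drop_eq_getElem_cons hi'.2]
    rw [List.getElem_take] at hgi
    rw [hgi]
    exact ⟨_, rfl⟩
  · cases hd : t.drop (PySem.Chars.find t [':']).toNat with
    | nil =>
      exfalso
      rw [hd, List.prefix_nil] at hpre
      simp at hpre
    | cons a r =>
      rw [hd] at hpre
      rw [List.cons_prefix_cons] at hpre
      exact ⟨r, by rw [hpre.1.symm]⟩

-- ---- pvScan equations ----
theorem pvScan_nil (P : List (List Char)) (sfx : List Char) : pvScan P sfx [] = [] := by rw [pvScan]

theorem pvScan_qual (P : List (List Char)) (sfx t3 : List Char)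
    (h0 : 0 ≤ PySem.Chars.find t3 [':'])
    (hm : t3.take (PySem.Chars.find t3 [':']).toNat ∈ P) :
    pvScan P sfx (':' :: '/' :: '/' :: t3) =
      ':' :: '/' :: '/' :: ((t3.take (PySem.Chars.find t3 [':']).toNat ++ sfx) ++
        pvScan P sfx (t3.drop (PySem.Chars.find t3 [':']).toNat)) := by
  have hpre : [':', '/', '/'] <+: (':' :: '/' :: '/' :: t3) := ⟨t3, rfl⟩
  rw [pvScan]
  simp only [hpre, dif_pos, List.drop_succ_cons, List.drop_zero]
  rw [if_pos ⟨h0, hm⟩]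

theorem pvScan_noqual (P : List (List Char)) (sfx t3 : List Char)
    (h : ¬ (0 ≤ PySem.Chars.find t3 [':'] ∧ t3.take (PySem.Chars.find t3 [':']).toNat ∈ P)) :
    pvScan P sfx (':' :: '/' :: '/' :: t3) = ':' :: pvScan P sfx ('/' :: '/' :: t3) := by
  have hpre : [':', '/', '/'] <+: (':' :: '/' :: '/' :: t3) := ⟨t3, rfl⟩
  rw [pvScan]
  simp only [hpre, dif_pos, List.drop_succ_cons, List.drop_zero]
  rw [if_neg h]

theorem pvScan_cons (P : List (List Char)) (sfx : List Char) (c : Char) (t : List Char)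
    (h : ¬ [':', '/', '/'] <+: (c :: t)) :
    pvScan P sfx (c :: t) = c :: pvScan P sfx t := by
  rw [pvScan]
  simp only [h, dif_neg, not_false_iff]

-- pvScan preserves the first three characters.
theorem pvScan_take3_aux (P : List (List Char)) (sfx : List Char) :
    ∀ (n : Nat) (l : List Char), l.length ≤ n → ∀ m, m ≤ 3 →
      (pvScan P sfx l).take m = l.take m := by
  intro n
  induction n with
  | zero =>
    intro l hl m _
    have : l = [] := List.eq_nil_of_length_eq_zero (Nat.le_zero.mp hl)
    subst this; rw [pvScan_nil]
  | succ n ih =>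
    intro l hl m hm
    cases l with
    | nil => rw [pvScan_nil]
    | cons c t =>
      by_cases hpre : [':', '/', '/'] <+: (c :: t)
      · obtain ⟨t3, ht3⟩ := hpre
        have hc : c :: t = ':' :: '/' :: '/' :: t3 := ht3.symm
        rw [hc]
        by_cases hg : 0 ≤ PySem.Chars.find t3 [':'] ∧
            t3.take (PySem.Chars.find t3 [':']).toNat ∈ P
        · rw [pvScan_qual P sfx t3 hg.1 hg.2]
          interval_cases m <;> simp
        · rw [pvScan_noqual P sfx t3 hg]
          cases m with
          | zero => simp
          | succ m' =>
            have hlen : ('/' :: '/' :: t3).length ≤ n := by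
              rw [hc] at hl; simp at hl ⊢; omega
            rw [List.take_succ_cons, List.take_succ_cons,
              ih ('/' :: '/' :: t3) hlen m' (by omega)]
      · rw [pvScan_cons P sfx c t hpre]
        cases m with
        | zero => simp
        | succ m' =>
          have hlen : t.length ≤ n := by simp at hl; omega
          rw [List.take_succ_cons, List.take_succ_cons, ih t hlen m' (by omega)]

theorem pvScan_take3 (P : List (List Char)) (sfx l : List Char) (m : Nat) (hm : m ≤ 3) :
    (pvScan P sfx l).take m = l.take m := pvScan_take3_aux P sfx l.length l le_rfl m hm

theorem pvNoSh_suffix (K : List (List Char)) (X cs : List Char) (h : X <:+ cs)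
    (hns : pvNoSh K cs) : pvNoSh K X := by
  intro k1 h1 k2 h2 hin
  exact hns k1 h1 k2 h2 (hin.trans h.isInfix)

theorem pvScan_pre3 (P : List (List Char)) (sfx l : List Char)
    (h : [':', '/', '/'] <+: pvScan P sfx l) : [':', '/', '/'] <+: l := by
  rw [List.prefix_iff_eq_take] at h ⊢
  simpa only [List.length_cons, List.length_nil,
    pvScan_take3 P sfx l 3 (by omega)] using h

theorem pvSfx_colon_free (app : List Char) (happ : ':' ∉ app) : ':' ∉ pvSfx app := by
  intro hmem
  rw [pvSfx] at hmem
  simp at hmem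
  exact happ hmem



theorem pvScan_head (P : List (List Char)) (sfx : List Char) (c : Char) (t : List Char) :
    ∃ y, pvScan P sfx (c :: t) = c :: y := by
  have h1 := pvScan_take3 P sfx (c :: t) 1 (by omega)
  cases hs : pvScan P sfx (c :: t) with
  | nil => rw [hs] at h1; simp at h1
  | cons d y =>
    rw [hs] at h1
    simp [List.take_succ_cons] at h1
    exact ⟨y, by rw [h1]⟩

theorem pvScan_skip (P : List (List Char)) (sfx u v : List Char) (hu : ':' ∉ u) :
    pvScan P sfx (u ++ ':' :: v) = u ++ pvScan P sfx (':' :: v) := by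
  induction u with
  | nil => simp
  | cons c u' ih =>
    have hc : c ≠ ':' := fun h => hu (by simp [h])
    have hpre : ¬ [':', '/', '/'] <+: (c :: (u' ++ ':' :: v)) := by
      intro h
      rw [List.cons_prefix_cons] at h
      exact hc h.1.symm
    rw [List.cons_append, pvScan_cons P sfx c _ hpre, ih (fun h => hu (by simp [h]))]
    simp

theorem pvScan_id (P : List (List Char)) (sfx l : List Char) (h : ':' ∉ l) :
    pvScan P sfx l = l := by
  induction l with
  | nil => exact pvScan_nil P sfx
  | cons c t ih =>
    have hc : c ≠ ':' := fun hc => h (by simp [hc])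
    have hpre : ¬ [':', '/', '/'] <+: (c :: t) := by
      intro hp; rw [List.cons_prefix_cons] at hp; exact hc hp.1.symm
    rw [pvScan_cons P sfx c t hpre, ih (fun hm => h (by simp [hm]))]

theorem pvScan_congr_aux (P Q : List (List Char)) (sfx : List Char)
    (h : ∀ x, ':' ∉ x → (x ∈ P ↔ x ∈ Q)) :
    ∀ (n : Nat) (l : List Char), l.length ≤ n → pvScan P sfx l = pvScan Q sfx l := by
  intro n
  induction n with
  | zero =>
    intro l hl
    have : l = [] := List.eq_nil_of_length_eq_zero (Nat.le_zero.mp hl)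
    subst this; rw [pvScan_nil, pvScan_nil]
  | succ n ih =>
    intro l hl
    cases l with
    | nil => rw [pvScan_nil, pvScan_nil]
    | cons c t =>
      by_cases hpre : [':', '/', '/'] <+: (c :: t)
      · obtain ⟨t3, ht3⟩ := hpre
        have hc : c :: t = ':' :: '/' :: '/' :: t3 := ht3.symm
        rw [hc]
        by_cases hg : 0 ≤ PySem.Chars.find t3 [':'] ∧
            t3.take (PySem.Chars.find t3 [':']).toNat ∈ P
        · have hgQ : t3.take (PySem.Chars.find t3 [':']).toNat ∈ Q :=
            (h _ (pvFind_pos t3 hg.1).1).mp hg.2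
          rw [pvScan_qual P sfx t3 hg.1 hg.2, pvScan_qual Q sfx t3 hg.1 hgQ]
          have : (t3.drop (PySem.Chars.find t3 [':']).toNat).length ≤ n := by
            rw [hc] at hl; simp at hl ⊢; omega
          rw [ih _ this]
        · have hgQ : ¬ (0 ≤ PySem.Chars.find t3 [':'] ∧
              t3.take (PySem.Chars.find t3 [':']).toNat ∈ Q) := by
            intro hq; exact hg ⟨hq.1, (h _ (pvFind_pos t3 hq.1).1).mpr hq.2⟩
          rw [pvScan_noqual P sfx t3 hg, pvScan_noqual Q sfx t3 hgQ]
          have : ('/' :: '/' :: t3).length ≤ n := by rw [hc] at hl; simp at hl ⊢; omega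
          rw [ih _ this]
      · rw [pvScan_cons P sfx c t hpre, pvScan_cons Q sfx c t hpre]
        have : t.length ≤ n := by simp at hl; omega
        rw [ih t this]

theorem pvScan_congr (P Q : List (List Char)) (sfx : List Char)
    (h : ∀ x, ':' ∉ x → (x ∈ P ↔ x ∈ Q)) : ∀ l, pvScan P sfx l = pvScan Q sfx l :=
  fun l => pvScan_congr_aux P Q sfx h l.length l le_rfl

theorem pvScan_empty_aux (sfx : List Char) :
    ∀ (n : Nat) (l : List Char), l.length ≤ n → pvScan [] sfx l = l := by
  intro n
  induction n with
  | zero =>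
    intro l hl
    have : l = [] := List.eq_nil_of_length_eq_zero (Nat.le_zero.mp hl)
    subst this; rw [pvScan_nil]
  | succ n ih =>
    intro l hl
    cases l with
    | nil => rw [pvScan_nil]
    | cons c t =>
      by_cases hpre : [':', '/', '/'] <+: (c :: t)
      · obtain ⟨t3, ht3⟩ := hpre
        have hc : c :: t = ':' :: '/' :: '/' :: t3 := ht3.symm
        rw [hc]
        rw [pvScan_noqual [] sfx t3 (by simp)]
        have : ('/' :: '/' :: t3).length ≤ n := by rw [hc] at hl; simp at hl ⊢; omega
        rw [ih _ this]
      · rw [pvScan_cons [] sfx c t hpre]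
        have : t.length ≤ n := by simp at hl; omega
        rw [ih t this]

theorem pvScan_empty (sfx : List Char) (l : List Char) : pvScan [] sfx l = l :=
  pvScan_empty_aux sfx l.length l le_rfl

-- ---- pvRep helper lemmas ----
theorem pvRep_skip (os new u X : List Char) (hu : ':' ∉ u) :
    pvRep os new (u ++ X) = u ++ pvRep os new X := by
  induction u with
  | nil => simp
  | cons c u' ih =>
    have hc : c ≠ ':' := fun h => hu (by simp [h])
    have hpre : ¬ (':' :: os) <+: (c :: (u' ++ X)) := by
      intro h; rw [List.cons_prefix_cons] at h; exact hc h.1.symm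
    rw [List.cons_append, pvRep_neg_cons os new c _ hpre, ih (fun h => hu (by simp [h]))]
    simp

theorem pvRep_id (os new l : List Char) (h : ':' ∉ l) : pvRep os new l = l := by
  induction l with
  | nil => exact pvRep_nil os new
  | cons c t ih =>
    have hc : c ≠ ':' := fun hc => h (by simp [hc])
    have hpre : ¬ (':' :: os) <+: (c :: t) := by
      intro hp; rw [List.cons_prefix_cons] at hp; exact hc hp.1.symm
    rw [pvRep_neg_cons os new c t hpre, ih (fun hm => h (by simp [hm]))]

theorem pvRep_no_occ (os new l : List Char) (h : ¬ (':' :: os) <:+: l) :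
    pvRep os new l = l := by
  induction l with
  | nil => exact pvRep_nil os new
  | cons c t ih =>
    have hpre : ¬ (':' :: os) <+: (c :: t) := fun hp => h hp.isInfix
    have ht : ¬ (':' :: os) <:+: t := fun hi => h (List.infix_cons_iff.mpr (Or.inr hi))
    rw [pvRep_neg_cons os new c t hpre, ih ht]

theorem pvRep_length_ge_aux (os new : List Char) (h : os.length + 1 ≤ new.length) :
    ∀ (n : Nat) (l : List Char), l.length ≤ n → l.length ≤ (pvRep os new l).length := by
  intro n
  induction n with
  | zero =>
    intro l hl
    have : l = [] := List.eq_nil_of_length_eq_zero (Nat.le_zero.mp hl)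
    subst this; simp
  | succ n ih =>
    intro l hl
    by_cases hpre : (':' :: os) <+: l
    · rw [pvRep_pos os new l hpre]
      have hlong : os.length + 1 ≤ l.length := by
        have := hpre.length_le; simpa using this
      have hdrop : (l.drop (os.length + 1)).length ≤ n := by
        simp only [List.length_drop]; omega
      have := ih (l.drop (os.length + 1)) hdrop
      simp only [List.length_append, List.length_drop] at *
      omega
    · cases l with
      | nil => simp
      | cons c t =>
        rw [pvRep_neg_cons os new c t hpre]
        have := ih t (by simp at hl; omega)
        simp only [List.length_cons]; omega

theorem pvRep_length_ge (os new l : List Char) (h : os.length + 1 ≤ new.length) :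
    l.length ≤ (pvRep os new l).length := pvRep_length_ge_aux os new h l.length l le_rfl

theorem pvRep_length_gt (os new l : List Char) (h : os.length + 1 < new.length)
    (hocc : (':' :: os) <:+: l) : l.length < (pvRep os new l).length := by
  induction l with
  | nil =>
    exfalso
    have := hocc.length_le; simp at this
  | cons c t ih =>
    by_cases hpre : (':' :: os) <+: (c :: t)
    · rw [pvRep_pos os new _ hpre]
      have hlong : os.length + 1 ≤ (c :: t).length := by
        have := hpre.length_le; simpa using this
      have := pvRep_length_ge os new ((c :: t).drop (os.length + 1)) (by omega)
      simp only [List.length_append, List.length_drop] at *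
      omega
    · have ht : (':' :: os) <:+: t := by
        rcases List.infix_cons_iff.mp hocc with hp | hi
        · exact absurd hp hpre
        · exact hi
      rw [pvRep_neg_cons os new c t hpre]
      have := ih ht
      simp only [List.length_cons]; omega

-- Colon-free prefix comparison: if k:' is a prefix of w:'y with k, w colon-free, then k = w.
theorem pvColonPrefix (k w y : List Char) (hk : ':' ∉ k) (hw : ':' ∉ w)
    (h : (k ++ [':']) <+: (w ++ ':' :: y)) : k = w := by
  induction k generalizing w with
  | nil =>
    cases w with
    | nil => rfl
    | cons c w' =>
      exfalso
      simp only [List.nil_append, List.cons_append, List.cons_prefix_cons] at h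
      exact hw (by simp [← h.1])
  | cons a k' ih =>
    cases w with
    | nil =>
      exfalso
      simp only [List.cons_append, List.nil_append, List.cons_prefix_cons] at h
      exact hk (by simp [h.1])
    | cons c w' =>
      simp only [List.cons_append, List.cons_prefix_cons] at h
      have := ih w' (fun hm => hk (by simp [hm])) (fun hm => hw (by simp [hm])) h.2
      rw [h.1, this]

-- ---- the master induction ----
-- M1 (.1): replacing pattern '://k:' by '://k.<app>.local:' in the P-scan of a good cs
--          yields the (k::P)-scan of cs.
-- M2 (.2): same statement for the tail of a cs that starts with ':' and does not itself
--          start with the pattern.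
theorem pvMain (app : List Char) (K : List (List Char)) (hctx : pvCtx app K)
    (k : List Char) (hk : k ∈ K) (P : List (List Char)) (hP : ∀ p ∈ P, p ∈ K) :
    ∀ n cs, cs.length ≤ n → pvNoSh K cs →
      (pvRep ('/' :: '/' :: (k ++ [':'])) (pvQual app k) (pvScan P (pvSfx app) cs) =
        pvScan (k :: P) (pvSfx app) cs) ∧
      (∀ r, cs = ':' :: r → ¬ pvPat k <+: cs →
        pvRep ('/' :: '/' :: (k ++ [':'])) (pvQual app k) ((pvScan P (pvSfx app) cs).tail) =
          (pvScan (k :: P) (pvSfx app) cs).tail) := by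
  obtain ⟨happ, hkeysfree, h3⟩ := hctx
  have hkfree : ':' ∉ k := hkeysfree k hk
  have hsfree : ':' ∉ pvSfx app := pvSfx_colon_free app happ
  intro n
  induction n with
  | zero =>
    intro cs hl hns
    have hnil : cs = [] := List.eq_nil_of_length_eq_zero (Nat.le_zero.mp hl)
    subst hnil
    refine ⟨by rw [pvScan_nil, pvScan_nil, pvRep_nil], ?_⟩
    intro r hr
    exact absurd hr (by simp)
  | succ n ih =>
    intro cs hl hns
    constructor
    · -- part 1
      cases cs with
      | nil => rw [pvScan_nil, pvScan_nil, pvRep_nil]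
      | cons c t =>
        by_cases hpre : [':', '/', '/'] <+: (c :: t)
        · obtain ⟨t3, ht3⟩ := hpre
          have hct : c :: t = ':' :: '/' :: '/' :: t3 := ht3.symm
          rw [hct]
          rw [hct] at hl hns
          by_cases hj : 0 ≤ PySem.Chars.find t3 [':']
          · obtain ⟨hnamefree, r, hdrop⟩ := pvFind_pos t3 hj
            have ht3d : t3 = t3.take (PySem.Chars.find t3 [':']).toNat ++ ':' :: r := by
              conv_lhs => rw [← List.take_append_drop (PySem.Chars.find t3 [':']).toNat t3]
              rw [hdrop]
            have hlr : (':' :: r).length ≤ n := by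
              rw [ht3d] at hl
              simp only [List.length_cons, List.length_append] at hl ⊢
              omega
            have hsufr : (':' :: r) <:+ (':' :: '/' :: '/' :: t3) := by
              refine ⟨':' :: '/' :: '/' :: t3.take (PySem.Chars.find t3 [':']).toNat, ?_⟩
              conv_rhs => rw [ht3d]
              simp
            have hnsr : pvNoSh K (':' :: r) := pvNoSh_suffix K _ _ hsufr hns
            obtain ⟨y, hy⟩ := pvScan_head P (pvSfx app) ':' r
            obtain ⟨y2, hy2⟩ := pvScan_head (k :: P) (pvSfx app) ':' r
            by_cases hmem : t3.take (PySem.Chars.find t3 [':']).toNat ∈ P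
            · -- CASE A: name already qualified by P
              rw [pvScan_qual P _ t3 hj hmem,
                pvScan_qual (k :: P) _ t3 hj (List.mem_cons_of_mem _ hmem)]
              rw [hdrop]
              have hnopfx : ¬ (':' :: '/' :: '/' :: (k ++ [':'])) <+:
                  (':' :: '/' :: '/' :: ((t3.take (PySem.Chars.find t3 [':']).toNat ++ pvSfx app)
                    ++ pvScan P (pvSfx app) (':' :: r))) := by
                intro hp
                simp only [List.cons_prefix_cons, true_and] at hp
                rw [hy] at hp
                have hkeq := pvColonPrefix k (t3.take (PySem.Chars.find t3 [':']).toNat ++ pvSfx app)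
                  y hkfree (by
                    simp only [List.mem_append]
                    rintro (h | h)
                    · exact hnamefree h
                    · exact hsfree h) (by simpa using hp)
                exact h3 _ (hP _ hmem) k hk hkeq
              rw [pvRep_neg_cons _ _ _ _ hnopfx]
              have hskip : ':' ∉ ('/' :: '/' :: (t3.take (PySem.Chars.find t3 [':']).toNat ++ pvSfx app)) := by
                intro hmem
                simp only [List.mem_cons, List.mem_append] at hmem
                rcases hmem with h | h | h | h
                · exact absurd h (by decide)
                · exact absurd h (by decide)
                · exact hnamefree h
                · exact hsfree h
              have hshape : ('/' :: '/' :: ((t3.take (PySem.Chars.find t3 [':']).toNat ++ pvSfx app)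
                    ++ pvScan P (pvSfx app) (':' :: r)))
                  = ('/' :: '/' :: (t3.take (PySem.Chars.find t3 [':']).toNat ++ pvSfx app))
                    ++ pvScan P (pvSfx app) (':' :: r) := by simp
              rw [hshape, pvRep_skip _ _ _ _ hskip, (ih (':' :: r) hlr hnsr).1]
              simp
            · -- name not in P
              have hLHS : pvScan P (pvSfx app) (':' :: '/' :: '/' :: t3)
                  = ':' :: '/' :: '/' :: (t3.take (PySem.Chars.find t3 [':']).toNat
                      ++ pvScan P (pvSfx app) (':' :: r)) := by
                rw [pvScan_noqual P _ t3 (by intro hc; exact hmem hc.2)]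
                rw [pvScan_cons P _ '/' ('/' :: t3) (by simp [List.cons_prefix_cons])]
                rw [pvScan_cons P _ '/' t3 (by simp [List.cons_prefix_cons])]
                conv_lhs => rw [ht3d, pvScan_skip P _ _ r hnamefree]
              by_cases hnk : t3.take (PySem.Chars.find t3 [':']).toNat = k
              · -- CASE B: the scan qualifies name = k here
                rw [hLHS, hnk, hy]
                have hform : (':' :: '/' :: '/' :: (k ++ ':' :: y))
                    = (':' :: '/' :: '/' :: (k ++ [':'])) ++ y := by simp
                rw [hform, pvRep_pos _ _ _ (List.prefix_append _ _)]
                have hlen1 : ('/' :: '/' :: (k ++ [':'])).length + 1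
                    = (':' :: '/' :: '/' :: (k ++ [':'])).length := by
                  simp
                rw [hlen1, List.drop_left]
                -- relate y to the tail of the scan of ':' :: r, and use part 2 of ih
                have hnp : ¬ pvPat k <+: (':' :: r) := by
                  intro hp
                  obtain ⟨r2, hr2⟩ := hp
                  apply hns k hk k hk
                  refine ⟨[], r2, ?_⟩
                  rw [ht3d, hnk]
                  simp only [pvShared, pvPat] at hr2 ⊢
                  simp only [List.nil_append, List.append_assoc]
                  rw [← hr2]
                  simp
                have hih2 := (ih (':' :: r) hlr hnsr).2 r rfl hnp
                rw [hy, hy2] at hih2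
                simp only [List.tail_cons] at hih2
                rw [hih2]
                rw [pvScan_qual (k :: P) _ t3 hj (by rw [hnk]; exact List.mem_cons_self), hdrop,
                  hnk, hy2]
                simp [pvQual]
              · -- CASE C: name not qualified on either side
                have hRHS : pvScan (k :: P) (pvSfx app) (':' :: '/' :: '/' :: t3)
                    = ':' :: '/' :: '/' :: (t3.take (PySem.Chars.find t3 [':']).toNat
                        ++ pvScan (k :: P) (pvSfx app) (':' :: r)) := by
                  rw [pvScan_noqual (k :: P) _ t3 (by
                    intro hc
                    rcases List.mem_cons.mp hc.2 with h | h
                    · exact hnk h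
                    · exact hmem h)]
                  rw [pvScan_cons (k :: P) _ '/' ('/' :: t3) (by simp [List.cons_prefix_cons])]
                  rw [pvScan_cons (k :: P) _ '/' t3 (by simp [List.cons_prefix_cons])]
                  conv_lhs => rw [ht3d, pvScan_skip (k :: P) _ _ r hnamefree]
                rw [hLHS, hRHS]
                have hnopfx : ¬ (':' :: '/' :: '/' :: (k ++ [':'])) <+:
                    (':' :: '/' :: '/' :: (t3.take (PySem.Chars.find t3 [':']).toNat
                      ++ pvScan P (pvSfx app) (':' :: r))) := by
                  intro hp
                  simp only [List.cons_prefix_cons, true_and] at hp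
                  rw [hy] at hp
                  exact hnk (pvColonPrefix k _ y hkfree hnamefree hp).symm
                rw [pvRep_neg_cons _ _ _ _ hnopfx]
                have hskip : ':' ∉ ('/' :: '/' :: t3.take (PySem.Chars.find t3 [':']).toNat) := by
                  intro hmem2
                  simp only [List.mem_cons] at hmem2
                  rcases hmem2 with h | h | h
                  · exact absurd h (by decide)
                  · exact absurd h (by decide)
                  · exact hnamefree h
                have hshape : ('/' :: '/' :: (t3.take (PySem.Chars.find t3 [':']).toNat
                      ++ pvScan P (pvSfx app) (':' :: r)))
                    = ('/' :: '/' :: t3.take (PySem.Chars.find t3 [':']).toNat)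
                      ++ pvScan P (pvSfx app) (':' :: r) := by simp
                rw [hshape, pvRep_skip _ _ _ _ hskip, (ih (':' :: r) hlr hnsr).1]
                simp
          · -- no colon in t3
            have hcf : ':' ∉ t3 := pvFind_neg t3 hj
            have hid : ∀ Q : List (List Char), pvScan Q (pvSfx app) (':' :: '/' :: '/' :: t3)
                = ':' :: '/' :: '/' :: t3 := by
              intro Q
              rw [pvScan_noqual Q _ t3 (by intro hc; exact hj hc.1)]
              rw [pvScan_cons Q _ '/' ('/' :: t3) (by simp [List.cons_prefix_cons])]
              rw [pvScan_cons Q _ '/' t3 (by simp [List.cons_prefix_cons])]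
              rw [pvScan_id Q _ t3 hcf]
            rw [hid P, hid (k :: P)]
            have hnopfx : ¬ (':' :: '/' :: '/' :: (k ++ [':'])) <+:
                (':' :: '/' :: '/' :: t3) := by
              intro hp
              simp only [List.cons_prefix_cons, true_and] at hp
              exact hcf (hp.subset (by simp))
            rw [pvRep_neg_cons _ _ _ _ hnopfx]
            rw [pvRep_id _ _ ('/' :: '/' :: t3) (by
              intro hmem2
              simp only [List.mem_cons] at hmem2
              rcases hmem2 with h | h | h
              · exact absurd h (by decide)
              · exact absurd h (by decide)
              · exact hcf h)]
        · -- head does not start '://'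
          rw [pvScan_cons P _ c t hpre, pvScan_cons (k :: P) _ c t hpre]
          have hnopfx : ¬ (':' :: '/' :: '/' :: (k ++ [':'])) <+: (c :: pvScan P (pvSfx app) t) := by
            intro hp
            have h3p : [':', '/', '/'] <+: (c :: pvScan P (pvSfx app) t) :=
              List.IsPrefix.trans ⟨k ++ [':'], rfl⟩ hp
            apply hpre
            have := pvScan_cons P (pvSfx app) c t hpre
            rw [← this] at h3p
            exact pvScan_pre3 P (pvSfx app) (c :: t) h3p
          rw [pvRep_neg_cons _ _ _ _ hnopfx]
          have hlt : t.length ≤ n := by simp at hl; omega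
          have hnst : pvNoSh K t := pvNoSh_suffix K t (c :: t) (List.suffix_cons c t) hns
          rw [(ih t hlt hnst).1]
    · -- part 2
      intro r0 hcs hnp
      subst hcs
      by_cases hpre : [':', '/', '/'] <+: (':' :: r0)
      · obtain ⟨t3, ht3⟩ := hpre
        have hr0 : r0 = '/' :: '/' :: t3 := by
          have := ht3.symm
          simp only [List.cons_append] at this
          exact (List.cons.injEq _ _ _ _).mp this |>.2
        subst hr0
        by_cases hj : 0 ≤ PySem.Chars.find t3 [':']
        · obtain ⟨hnamefree, r, hdrop⟩ := pvFind_pos t3 hj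
          have ht3d : t3 = t3.take (PySem.Chars.find t3 [':']).toNat ++ ':' :: r := by
            conv_lhs => rw [← List.take_append_drop (PySem.Chars.find t3 [':']).toNat t3]
            rw [hdrop]
          have hlr : (':' :: r).length ≤ n := by
            rw [ht3d] at hl
            simp only [List.length_cons, List.length_append] at hl ⊢
            omega
          have hsufr : (':' :: r) <:+ (':' :: '/' :: '/' :: t3) := by
            refine ⟨':' :: '/' :: '/' :: t3.take (PySem.Chars.find t3 [':']).toNat, ?_⟩
            conv_rhs => rw [ht3d]
            simp
          have hnsr : pvNoSh K (':' :: r) := pvNoSh_suffix K _ _ hsufr hns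
          have hnk : t3.take (PySem.Chars.find t3 [':']).toNat ≠ k := by
            intro hnk
            apply hnp
            simp only [pvPat]
            refine ⟨r, ?_⟩
            conv_rhs => rw [ht3d, hnk]
            simp
          by_cases hmem : t3.take (PySem.Chars.find t3 [':']).toNat ∈ P
          · rw [pvScan_qual P _ t3 hj hmem,
              pvScan_qual (k :: P) _ t3 hj (List.mem_cons_of_mem _ hmem), hdrop]
            simp only [List.tail_cons]
            have hskip : ':' ∉ ('/' :: '/' :: (t3.take (PySem.Chars.find t3 [':']).toNat ++ pvSfx app)) := by
              intro hmem2
              simp only [List.mem_cons, List.mem_append] at hmem2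
              rcases hmem2 with h | h | h | h
              · exact absurd h (by decide)
              · exact absurd h (by decide)
              · exact hnamefree h
              · exact hsfree h
            have hshape : ∀ X : List Char, ('/' :: '/' :: ((t3.take (PySem.Chars.find t3 [':']).toNat ++ pvSfx app) ++ X))
                = ('/' :: '/' :: (t3.take (PySem.Chars.find t3 [':']).toNat ++ pvSfx app)) ++ X := by
              intro X; simp
            rw [hshape, pvRep_skip _ _ _ _ hskip, (ih (':' :: r) hlr hnsr).1, ← hshape]
          · have hLHS : pvScan P (pvSfx app) (':' :: '/' :: '/' :: t3)
                = ':' :: '/' :: '/' :: (t3.take (PySem.Chars.find t3 [':']).toNat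
                    ++ pvScan P (pvSfx app) (':' :: r)) := by
              rw [pvScan_noqual P _ t3 (by intro hc; exact hmem hc.2)]
              rw [pvScan_cons P _ '/' ('/' :: t3) (by simp [List.cons_prefix_cons])]
              rw [pvScan_cons P _ '/' t3 (by simp [List.cons_prefix_cons])]
              conv_lhs => rw [ht3d, pvScan_skip P _ _ r hnamefree]
            have hRHS : pvScan (k :: P) (pvSfx app) (':' :: '/' :: '/' :: t3)
                = ':' :: '/' :: '/' :: (t3.take (PySem.Chars.find t3 [':']).toNat
                    ++ pvScan (k :: P) (pvSfx app) (':' :: r)) := by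
              rw [pvScan_noqual (k :: P) _ t3 (by
                intro hc
                rcases List.mem_cons.mp hc.2 with h | h
                · exact hnk h
                · exact hmem h)]
              rw [pvScan_cons (k :: P) _ '/' ('/' :: t3) (by simp [List.cons_prefix_cons])]
              rw [pvScan_cons (k :: P) _ '/' t3 (by simp [List.cons_prefix_cons])]
              conv_lhs => rw [ht3d, pvScan_skip (k :: P) _ _ r hnamefree]
            rw [hLHS, hRHS]
            simp only [List.tail_cons]
            have hskip : ':' ∉ ('/' :: '/' :: t3.take (PySem.Chars.find t3 [':']).toNat) := by
              intro hmem2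
              simp only [List.mem_cons] at hmem2
              rcases hmem2 with h | h | h
              · exact absurd h (by decide)
              · exact absurd h (by decide)
              · exact hnamefree h
            have hshape : ∀ X : List Char, ('/' :: '/' :: (t3.take (PySem.Chars.find t3 [':']).toNat ++ X))
                = ('/' :: '/' :: t3.take (PySem.Chars.find t3 [':']).toNat) ++ X := by
              intro X; simp
            rw [hshape, pvRep_skip _ _ _ _ hskip, (ih (':' :: r) hlr hnsr).1, ← hshape]
        · have hcf : ':' ∉ t3 := pvFind_neg t3 hj
          have hid : ∀ Q : List (List Char), pvScan Q (pvSfx app) (':' :: '/' :: '/' :: t3)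
              = ':' :: '/' :: '/' :: t3 := by
            intro Q
            rw [pvScan_noqual Q _ t3 (by intro hc; exact hj hc.1)]
            rw [pvScan_cons Q _ '/' ('/' :: t3) (by simp [List.cons_prefix_cons])]
            rw [pvScan_cons Q _ '/' t3 (by simp [List.cons_prefix_cons])]
            rw [pvScan_id Q _ t3 hcf]
          rw [hid P, hid (k :: P)]
          simp only [List.tail_cons]
          rw [pvRep_id _ _ ('/' :: '/' :: t3) (by
            intro hmem2
            simp only [List.mem_cons] at hmem2
            rcases hmem2 with h | h | h
            · exact absurd h (by decide)
            · exact absurd h (by decide)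
            · exact hcf h)]
      · rw [pvScan_cons P _ ':' r0 hpre, pvScan_cons (k :: P) _ ':' r0 hpre]
        simp only [List.tail_cons]
        have hlt : r0.length ≤ n := by simp at hl; omega
        have hnst : pvNoSh K r0 := pvNoSh_suffix K r0 (':' :: r0) (List.suffix_cons ':' r0) hns
        exact (ih r0 hlt hnst).1

-- ---- assembly: from the ports to pvRep / pvScan ----

theorem pvSelfReplace (os q : List Char) : pvRep os q (':' :: os) = q := by
  rw [pvRep_pos os q _ (List.prefix_refl _)]
  rw [show os.length + 1 = (':' :: os).length by simp, List.drop_length, pvRep_nil,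
    List.append_nil]

-- A's per-key step, named so the outer fold can be peeled off.
def pvOuter (app_name : String) (fixed_value : String) (svc_name : String) : String :=
  let patterns : List String :=
    ["://" ++ svc_name ++ ":", "http://" ++ svc_name ++ ":", "https://" ++ svc_name ++ ":"]
  patterns.foldl (fun fixed_value pattern =>
    if PySem.Str.isIn pattern fixed_value then
      let fixed_pattern := PySem.Str.replace pattern ("://" ++ svc_name ++ ":") ("://" ++ svc_name ++ "." ++ app_name ++ ".local:")
      PySem.Str.replace fixed_value pattern fixed_pattern
    else fixed_value) fixed_value

theorem pvA_eq_fold (value : String) (all_services : List (String × String)) (app_name : String) :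
    fix_service_references_py value all_services app_name
      = ((PySem.Dict.ofList all_services).keys).foldl (pvOuter app_name) value := rfl

theorem pvP1_toList (svc : String) :
    ("://" ++ svc ++ ":").toList = ':' :: ('/' :: '/' :: (svc.toList ++ [':'])) := by
  simp [String.toList_append]

theorem pvP2_toList (svc : String) :
    ("http://" ++ svc ++ ":").toList
      = ['h', 't', 't', 'p'] ++ (':' :: ('/' :: '/' :: (svc.toList ++ [':']))) := by
  simp [String.toList_append]

theorem pvP3_toList (svc : String) :
    ("https://" ++ svc ++ ":").toList
      = ['h', 't', 't', 'p', 's'] ++ (':' :: ('/' :: '/' :: (svc.toList ++ [':']))) := by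
  simp [String.toList_append]

theorem pvQ1_toList (svc app_name : String) :
    ("://" ++ svc ++ "." ++ app_name ++ ".local:").toList
      = pvQual app_name.toList svc.toList := by
  simp [String.toList_append, pvQual, pvSfx]

theorem pvShared_toList (s1 s2 : String) :
    ("://" ++ s1 ++ "://" ++ s2 ++ ":").toList = pvShared s1.toList s2.toList := by
  simp [String.toList_append, pvShared]

theorem pvQual_len (app k : List Char) : (k.length + 3) + 1 < (pvQual app k).length := by
  simp only [pvQual, pvSfx, List.length_append, List.length_cons, List.length_nil]
  omega

theorem pvPass (app_name : String) (K : List (List Char)) (hctx : pvCtx app_name.toList K)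
    (svc : String) (hsvc : svc.toList ∈ K) (P : List (List Char)) (hP : ∀ p ∈ P, p ∈ K)
    (cs : List Char) (hns : pvNoSh K cs) (fv : String)
    (hfv : fv.toList = pvScan P (pvSfx app_name.toList) cs) :
    (pvOuter app_name fv svc).toList = pvScan (svc.toList :: P) (pvSfx app_name.toList) cs := by
  have hP' : ∀ p ∈ (svc.toList :: P), p ∈ K := by
    intro p hp
    rcases List.mem_cons.mp hp with h | h
    · rw [h]; exact hsvc
    · exact hP p h
  have hm1 := (pvMain app_name.toList K hctx svc.toList hsvc P hP cs.length cs le_rfl hns).1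
  have hm2 := (pvMain app_name.toList K hctx svc.toList hsvc (svc.toList :: P) hP'
    cs.length cs le_rfl hns).1
  have hcong := pvScan_congr (svc.toList :: svc.toList :: P) (svc.toList :: P)
    (pvSfx app_name.toList) (by
      intro x _
      simp only [List.mem_cons]
      tauto) cs
  have hfix : pvRep ('/' :: '/' :: (svc.toList ++ [':'])) (pvQual app_name.toList svc.toList)
      (pvScan (svc.toList :: P) (pvSfx app_name.toList) cs)
      = pvScan (svc.toList :: P) (pvSfx app_name.toList) cs := by rw [hm2, hcong]
  -- step 1
  have hstep1 : ((if PySem.Str.isIn ("://" ++ svc ++ ":") fv then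
      PySem.Str.replace fv ("://" ++ svc ++ ":")
        (PySem.Str.replace ("://" ++ svc ++ ":") ("://" ++ svc ++ ":")
          ("://" ++ svc ++ "." ++ app_name ++ ".local:"))
    else fv)).toList = pvScan (svc.toList :: P) (pvSfx app_name.toList) cs := by
    by_cases hin : PySem.Str.isIn ("://" ++ svc ++ ":") fv
    · rw [if_pos hin]
      rw [PySem.Str.toList_replace, PySem.Str.toList_replace, pvP1_toList, pvQ1_toList]
      rw [pvReplace_eq_pvRep, pvReplace_eq_pvRep, pvSelfReplace, hfv]
      exact hm1
    · rw [if_neg hin]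
      rw [PySem.Str.isIn_eq] at hin
      have hnin : ¬ (':' :: ('/' :: '/' :: (svc.toList ++ [':']))) <:+:
          pvScan P (pvSfx app_name.toList) cs := by
        rw [← hfv]
        intro hi
        apply hin
        rw [pvP1_toList, PySem.Chars.isIn_iff_infix]
        exact hi
      rw [hfv, ← hm1, pvRep_no_occ _ _ _ hnin]
  -- steps 2 and 3 do not fire
  have hnoin : ∀ pre : List Char,
      PySem.Chars.isIn (pre ++ (':' :: ('/' :: '/' :: (svc.toList ++ [':']))))
        (pvScan (svc.toList :: P) (pvSfx app_name.toList) cs) = false := by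
    intro pre
    rw [PySem.Chars.isIn_eq_false_iff]
    intro hi
    have hi1 : (':' :: ('/' :: '/' :: (svc.toList ++ [':']))) <:+:
        pvScan (svc.toList :: P) (pvSfx app_name.toList) cs :=
      List.IsInfix.trans ⟨pre, [], by simp⟩ hi
    have := pvRep_length_gt ('/' :: '/' :: (svc.toList ++ [':']))
      (pvQual app_name.toList svc.toList) _ (by
        have := pvQual_len app_name.toList svc.toList
        simpa using this) hi1
    rw [hfix] at this
    omega
  -- assemble the three-pattern fold
  show (List.foldl _ fv _).toList = _
  rw [List.foldl_cons, List.foldl_cons, List.foldl_cons, List.foldl_nil]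
  -- name the state after step 1
  generalize hX : (if PySem.Str.isIn ("://" ++ svc ++ ":") fv then
      PySem.Str.replace fv ("://" ++ svc ++ ":")
        (PySem.Str.replace ("://" ++ svc ++ ":") ("://" ++ svc ++ ":")
          ("://" ++ svc ++ "." ++ app_name ++ ".local:"))
    else fv) = X at hstep1 ⊢
  have hin2 : ¬ PySem.Str.isIn ("http://" ++ svc ++ ":") X := by
    rw [PySem.Str.isIn_eq, pvP2_toList, hstep1]
    rw [hnoin ['h', 't', 't', 'p']]
    simp
  have hin3 : ¬ PySem.Str.isIn ("https://" ++ svc ++ ":") X := by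
    rw [PySem.Str.isIn_eq, pvP3_toList, hstep1]
    rw [hnoin ['h', 't', 't', 'p', 's']]
    simp
  rw [if_neg hin2, if_neg hin3]
  exact hstep1

-- occurrences of a ':'-headed pattern in u ++ X with u colon-free lie in X
theorem pvInfix_skip (u X S : List Char) (hu : ':' ∉ u) (h : (':' :: S) <:+: (u ++ X)) :
    (':' :: S) <:+: X := by
  induction u with
  | nil => simpa using h
  | cons c u' ih =>
    rw [List.cons_append] at h
    rcases List.infix_cons_iff.mp h with hp | hi
    · exfalso
      rw [List.cons_prefix_cons] at hp
      exact hu (by rw [hp.1]; exact List.mem_cons_self)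
    · exact ih (fun hm => hu (by simp [hm])) hi

theorem pvPat_head_prefix (khead Z : List Char) :
    pvPat khead <+: ([':', '/', '/'] ++ khead ++ ':' :: Z) := by
  simp only [pvPat, List.append_assoc, List.cons_append, List.nil_append,
    List.cons_prefix_cons, true_and]
  exact ⟨Z, by simp⟩

-- a key containing ':' whose colon-free head never occurs as '://head:' in cs (and which
-- does not contain the DNS suffix) can never match in any scan image of cs
theorem pvNoOccScan (app : List Char) (happ : ':' ∉ app)
    (P : List (List Char)) (hP : ∀ p ∈ P, ':' ∉ p)
    (khead ktail : List Char) (hkh : ':' ∉ khead)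
    (hsfx : ¬ pvSfx app <:+: (khead ++ ':' :: ktail)) :
    ∀ n cs, cs.length ≤ n → ¬ pvPat khead <:+: cs →
      ¬ pvPat (khead ++ ':' :: ktail) <:+: pvScan P (pvSfx app) cs := by
  have hsfree : ':' ∉ pvSfx app := pvSfx_colon_free app happ
  have hfull : pvPat (khead ++ ':' :: ktail)
      = [':', '/', '/'] ++ khead ++ ':' :: (ktail ++ [':']) := by
    simp [pvPat]
  have hheadpfx : pvPat khead <+: pvPat (khead ++ ':' :: ktail) := by
    rw [hfull]
    exact pvPat_head_prefix khead (ktail ++ [':'])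
  intro n
  induction n with
  | zero =>
    intro cs hl _ hin
    have : cs = [] := List.eq_nil_of_length_eq_zero (Nat.le_zero.mp hl)
    subst this
    rw [pvScan_nil] at hin
    have := List.eq_nil_of_infix_nil hin
    simp [pvPat] at this
  | succ n ih =>
    intro cs hl hno hin
    cases cs with
    | nil =>
      rw [pvScan_nil] at hin
      have := List.eq_nil_of_infix_nil hin
      simp [pvPat] at this
    | cons c t =>
      by_cases hpre : [':', '/', '/'] <+: (c :: t)
      · obtain ⟨t3, ht3⟩ := hpre
        have hct : c :: t = ':' :: '/' :: '/' :: t3 := ht3.symm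
        rw [hct] at hin hl hno
        by_cases hj : 0 ≤ PySem.Chars.find t3 [':']
        · obtain ⟨hnamefree, r, hdrop⟩ := pvFind_pos t3 hj
          have ht3d : t3 = t3.take (PySem.Chars.find t3 [':']).toNat ++ ':' :: r := by
            conv_lhs => rw [← List.take_append_drop (PySem.Chars.find t3 [':']).toNat t3]
            rw [hdrop]
          have hlr : (':' :: r).length ≤ n := by
            rw [ht3d] at hl
            simp only [List.length_cons, List.length_append] at hl ⊢
            omega
          have hnor : ¬ pvPat khead <:+: (':' :: r) := by
            intro hi
            apply hno
            refine hi.trans ?_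
            refine (List.IsSuffix.isInfix ?_)
            refine ⟨':' :: '/' :: '/' :: t3.take (PySem.Chars.find t3 [':']).toNat, ?_⟩
            conv_rhs => rw [ht3d]
            simp
          obtain ⟨y, hy⟩ := pvScan_head P (pvSfx app) ':' r
          -- the head prefix case is impossible in both branches
          have hnohd : ∀ w : List Char, ':' ∉ w →
              (w = t3.take (PySem.Chars.find t3 [':']).toNat
                ∨ w = t3.take (PySem.Chars.find t3 [':']).toNat ++ pvSfx app) →
              ∀ y' : List Char,
              ¬ pvPat (khead ++ ':' :: ktail) <+: (':' :: '/' :: '/' :: (w ++ ':' :: y')) := by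
            intro w hwfree hw y' hp
            rw [hfull] at hp
            simp only [List.cons_append, List.nil_append, List.cons_prefix_cons,
              true_and] at hp
            have hp' : (khead ++ [':']) <+: (w ++ ':' :: y') := by
              have h1 : (khead ++ [':']) <+: (khead ++ ':' :: (ktail ++ [':'])) :=
                ⟨ktail ++ [':'], by simp⟩
              exact h1.trans hp
            have hkw := pvColonPrefix khead w y' hkh hwfree hp'
            rcases hw with hw | hw
            · -- khead = name: the pattern '://khead:' occurs in cs
              apply hno
              refine List.IsPrefix.isInfix ?_
              rw [hkw, hw]
              conv_rhs => rw [ht3d]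
              exact pvPat_head_prefix _ r
            · -- khead = name ++ sfx: the key contains the DNS suffix
              apply hsfx
              have : pvSfx app <:+: khead := by
                rw [hkw, hw]
                exact ⟨t3.take (PySem.Chars.find t3 [':']).toNat, [], by simp⟩
              exact this.trans (List.prefix_append khead (':' :: ktail)).isInfix
          by_cases hmem : t3.take (PySem.Chars.find t3 [':']).toNat ∈ P
          · rw [pvScan_qual P _ t3 hj hmem, hdrop, hy] at hin
            rcases List.infix_cons_iff.mp hin with hp | hin1
            · exact hnohd _ (by
                intro hm
                rcases List.mem_append.mp hm with hm | hm
                · exact hnamefree hm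
                · exact hsfree hm) (Or.inr rfl) y (by
                  simpa [List.append_assoc] using hp)
            rcases List.infix_cons_iff.mp hin1 with hp | hin2
            · rw [hfull] at hp; simp [List.cons_prefix_cons] at hp
            rcases List.infix_cons_iff.mp hin2 with hp | hin3
            · rw [hfull] at hp; simp [List.cons_prefix_cons] at hp
            · have hin4 : pvPat (khead ++ ':' :: ktail) <:+: (':' :: y) := by
                rw [hfull] at hin3 ⊢
                have := pvInfix_skip (t3.take (PySem.Chars.find t3 [':']).toNat ++ pvSfx app)
                  (':' :: y) _ (by
                    intro hm
                    rcases List.mem_append.mp hm with hm | hm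
                    · exact hnamefree hm
                    · exact hsfree hm) (by simpa [List.append_assoc] using hin3)
                simpa using this
              rw [← hy] at hin4
              exact ih (':' :: r) hlr hnor (by rw [hfull] at hin4 ⊢; exact hin4)
          · have hLHS : pvScan P (pvSfx app) (':' :: '/' :: '/' :: t3)
                = ':' :: '/' :: '/' :: (t3.take (PySem.Chars.find t3 [':']).toNat
                    ++ pvScan P (pvSfx app) (':' :: r)) := by
              rw [pvScan_noqual P _ t3 (by intro hc; exact hmem hc.2)]
              rw [pvScan_cons P _ '/' ('/' :: t3) (by simp [List.cons_prefix_cons])]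
              rw [pvScan_cons P _ '/' t3 (by simp [List.cons_prefix_cons])]
              conv_lhs => rw [ht3d, pvScan_skip P _ _ r hnamefree]
            rw [hLHS, hy] at hin
            rcases List.infix_cons_iff.mp hin with hp | hin1
            · exact hnohd _ hnamefree (Or.inl rfl) y hp
            rcases List.infix_cons_iff.mp hin1 with hp | hin2
            · rw [hfull] at hp; simp [List.cons_prefix_cons] at hp
            rcases List.infix_cons_iff.mp hin2 with hp | hin3
            · rw [hfull] at hp; simp [List.cons_prefix_cons] at hp
            · have hin4 : pvPat (khead ++ ':' :: ktail) <:+: (':' :: y) := by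
                rw [hfull] at hin3 ⊢
                exact pvInfix_skip _ _ _ hnamefree hin3
              rw [← hy] at hin4
              exact ih (':' :: r) hlr hnor (by rw [hfull] at hin4 ⊢; exact hin4)
        · have hcf : ':' ∉ t3 := pvFind_neg t3 hj
          have hid : pvScan P (pvSfx app) (':' :: '/' :: '/' :: t3)
              = ':' :: '/' :: '/' :: t3 := by
            rw [pvScan_noqual P _ t3 (by intro hc; exact hj hc.1)]
            rw [pvScan_cons P _ '/' ('/' :: t3) (by simp [List.cons_prefix_cons])]
            rw [pvScan_cons P _ '/' t3 (by simp [List.cons_prefix_cons])]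
            rw [pvScan_id P _ t3 hcf]
          rw [hid] at hin
          exact hno (hheadpfx.isInfix.trans hin)
      · rw [pvScan_cons P _ c t hpre] at hin
        rcases List.infix_cons_iff.mp hin with hp | hi
        · apply hpre
          have h3p : [':', '/', '/'] <+: (c :: pvScan P (pvSfx app) t) := by
            refine List.IsPrefix.trans ?_ hp
            rw [hfull]
            exact ⟨khead ++ ':' :: (ktail ++ [':']), by simp⟩
          rw [← pvScan_cons P _ c t hpre] at h3p
          exact pvScan_pre3 P _ (c :: t) h3p
        · have hlt : t.length ≤ n := by simp at hl; omega
          have hnot : ¬ pvPat khead <:+: t := fun hti =>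
            hno (List.infix_cons_iff.mpr (Or.inr hti))
          exact ih t hlt hnot hi

theorem pvInsert_keys_sub (d : PySem.Dict String String) (k : String) (v : String) :
    ∀ x ∈ (d.insert k v).keys, x ∈ d.keys ∨ x = k := by
  intro x hx
  rw [PySem.Dict.insert] at hx
  by_cases hc : d.contains k
  · simp only [hc, if_true] at hx
    simp only [PySem.Dict.keys, List.map_map, List.mem_map] at hx
    obtain ⟨p, hp, hpx⟩ := hx
    by_cases hpk : p.1 == k
    · right
      simp only [Function.comp_apply, hpk, if_true] at hpx
      exact hpx.symm ▸ rfl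
    · left
      simp only [Function.comp_apply, hpk, if_false, Bool.false_eq_true] at hpx
      exact List.mem_map.mpr ⟨p, hp, hpx⟩
  · simp only [hc, if_false, Bool.false_eq_true] at hx
    simp only [PySem.Dict.keys, List.map_append, List.mem_append, List.map_cons,
      List.map_nil, List.mem_cons] at hx
    rcases hx with h | h
    · exact Or.inl h
    · simp at h
      exact Or.inr h

theorem pvUpdate_keys_sub :
    ∀ (ps : List (String × String)) (d : PySem.Dict String String),
      ∀ x ∈ (d.update ps).keys, x ∈ d.keys ∨ x ∈ ps.map Prod.fst := by
  intro ps
  induction ps with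
  | nil => intro d x hx; exact Or.inl hx
  | cons p ps' ih =>
    intro d x hx
    have : d.update (p :: ps') = (d.insert p.1 p.2).update ps' := rfl
    rw [this] at hx
    rcases ih (d.insert p.1 p.2) x hx with h | h
    · rcases pvInsert_keys_sub d p.1 p.2 x h with h' | h'
      · exact Or.inl h'
      · exact Or.inr (by simp [h'])
    · exact Or.inr (by simp [h])

theorem pvDictKeys_sub (ps : List (String × String)) :
    ∀ x ∈ (PySem.Dict.ofList ps).keys, x ∈ ps.map Prod.fst := by
  intro x hx
  rcases pvUpdate_keys_sub ps PySem.Dict.empty x hx with h | h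
  · simp [PySem.Dict.empty, PySem.Dict.keys] at h
  · exact h

theorem pvSuffix_toList (app_name : String) :
    ("." ++ app_name ++ ".local").toList = pvSfx app_name.toList := by
  simp [String.toList_append, pvSfx]


theorem pvPatS_toList (svc : String) : ("://" ++ svc ++ ":").toList = pvPat svc.toList := by
  simp [String.toList_append, pvPat]

-- A's per-key step leaves the string unchanged when the primary pattern is absent.
theorem pvOuter_id (app_name fv svc : String)
    (hin : ¬ PySem.Str.isIn ("://" ++ svc ++ ":") fv) : pvOuter app_name fv svc = fv := by
  have hmono : ∀ pre : List Char, ¬ PySem.Chars.isIn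
      (pre ++ (':' :: ('/' :: '/' :: (svc.toList ++ [':'])))) fv.toList := by
    intro pre h
    apply hin
    rw [PySem.Str.isIn_eq, pvP1_toList]
    rw [PySem.Chars.isIn_iff_infix] at h ⊢
    exact List.IsInfix.trans ⟨pre, [], by simp⟩ h
  have h2 : ¬ PySem.Str.isIn ("http://" ++ svc ++ ":") fv := by
    rw [PySem.Str.isIn_eq, pvP2_toList]
    exact hmono ['h', 't', 't', 'p']
  have h3 : ¬ PySem.Str.isIn ("https://" ++ svc ++ ":") fv := by
    rw [PySem.Str.isIn_eq, pvP3_toList]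
    exact hmono ['h', 't', 't', 'p', 's']
  show List.foldl _ fv _ = fv
  rw [List.foldl_cons, List.foldl_cons, List.foldl_cons, List.foldl_nil]
  rw [if_neg hin, if_neg h2, if_neg h3]

-- if no name in P occurs as '://name:' in l0, the scan is the identity on suffixes of l0
theorem pvScan_nomatch (P : List (List Char)) (sfx l0 : List Char)
    (h : ∀ p ∈ P, ¬ pvPat p <:+: l0) :
    ∀ (n : Nat) (cs : List Char), cs.length ≤ n → cs <:+ l0 → pvScan P sfx cs = cs := by
  intro n
  induction n with
  | zero =>
    intro cs hl _
    have : cs = [] := List.eq_nil_of_length_eq_zero (Nat.le_zero.mp hl)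
    subst this; rw [pvScan_nil]
  | succ n ih =>
    intro cs hl hsuf
    cases cs with
    | nil => rw [pvScan_nil]
    | cons c t =>
      by_cases hpre : [':', '/', '/'] <+: (c :: t)
      · obtain ⟨t3, ht3⟩ := hpre
        have hct : c :: t = ':' :: '/' :: '/' :: t3 := ht3.symm
        rw [hct] at hl hsuf ⊢
        rw [pvScan_noqual P sfx t3 (by
          rintro ⟨hj0, hmem⟩
          obtain ⟨hnamefree, r, hdrop⟩ := pvFind_pos t3 hj0
          have ht3d : t3 = t3.take (PySem.Chars.find t3 [':']).toNat ++ ':' :: r := by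
            conv_lhs => rw [← List.take_append_drop (PySem.Chars.find t3 [':']).toNat t3]
            rw [hdrop]
          apply h _ hmem
          refine List.IsInfix.trans ?_ hsuf.isInfix
          refine List.IsPrefix.isInfix ?_
          conv_rhs => rw [ht3d]
          exact pvPat_head_prefix _ r)]
        rw [pvScan_cons P sfx '/' ('/' :: t3) (by simp [List.cons_prefix_cons])]
        rw [pvScan_cons P sfx '/' t3 (by simp [List.cons_prefix_cons])]
        have hsuf3 : t3 <:+ l0 := by
          refine List.IsSuffix.trans ⟨[':', '/', '/'], rfl⟩ hsuf
        rw [ih t3 (by simp at hl; omega) hsuf3]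
      · rw [pvScan_cons P sfx c t hpre]
        have hsuft : t <:+ l0 := List.IsSuffix.trans (List.suffix_cons c t) hsuf
        rw [ih t (by simp at hl; omega) hsuft]

-- A's whole fold is the identity when no key's primary pattern occurs in the value
theorem pvAfold_id (app_name : String) (value : String) :
    ∀ ks : List String, (∀ x ∈ ks, ¬ PySem.Str.isIn ("://" ++ x ++ ":") value) →
      ks.foldl (pvOuter app_name) value = value := by
  intro ks
  induction ks with
  | nil => intro _; rfl
  | cons kS ks' ih =>
    intro hks
    rw [List.foldl_cons, pvOuter_id app_name value kS (hks kS List.mem_cons_self)]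
    exact ih (fun x hx => hks x (List.mem_cons_of_mem _ hx))

-- decomposition of a colon-containing key at its first ':'
theorem pvColonSplit (l : List Char) (h : ':' ∈ l) :
    ':' ∉ l.takeWhile (· ≠ ':') ∧
    l = l.takeWhile (· ≠ ':') ++ ':' :: (l.dropWhile (· ≠ ':')).tail := by
  constructor
  · intro hm
    have := List.mem_takeWhile_imp hm
    simp at this
  · have hne : l.dropWhile (· ≠ ':') ≠ [] := by
      rw [Ne, List.dropWhile_eq_nil_iff]
      push_neg
      exact ⟨':', h, by simp⟩
    have hhead : (l.dropWhile (· ≠ ':')).head hne = ':' := by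
      have := List.head_dropWhile_not (fun c => decide (c ≠ ':')) (l := l) hne
      simpa using this
    conv_lhs => rw [← List.takeWhile_append_dropWhile (p := fun c => decide (c ≠ ':')) (l := l),
      ← List.cons_head_tail hne, hhead]

-- the mixed fold: colon-free keys advance the scan, colon-bearing keys are inert
theorem pvFoldKeys (app_name : String) (K : List (List Char)) (hctx : pvCtx app_name.toList K)
    (cs : List Char) (hns : pvNoSh K cs) :
    ∀ (ks : List String) (P : List (List Char)),
      (∀ x ∈ ks, ':' ∉ x.toList → x.toList ∈ K) →
      (∀ x ∈ ks, ':' ∈ x.toList →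
        ¬ pvPat (x.toList.takeWhile (· ≠ ':')) <:+: cs ∧
        ¬ pvSfx app_name.toList <:+: x.toList) →
      (∀ p ∈ P, p ∈ K) → ∀ fv : String, fv.toList = pvScan P (pvSfx app_name.toList) cs →
      (ks.foldl (pvOuter app_name) fv).toList
        = pvScan (((ks.filter (fun xS => ':' ∉ xS.toList)).reverse.map String.toList) ++ P)
            (pvSfx app_name.toList) cs := by
  intro ks
  induction ks with
  | nil => intro P _ _ _ fv hfv; simpa using hfv
  | cons kS ks' ih =>
    intro P hcf hcol hP fv hfv
    rw [List.foldl_cons]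
    by_cases hcolk : ':' ∈ kS.toList
    · -- inert colon key
      obtain ⟨hWfree, hsplit⟩ := pvColonSplit kS.toList hcolk
      obtain ⟨hnokh, hnosfx⟩ := hcol kS List.mem_cons_self hcolk
      have hnin : ¬ PySem.Str.isIn ("://" ++ kS ++ ":") fv := by
        rw [PySem.Str.isIn_eq]
        rw [← Bool.not_eq_false, not_not, PySem.Chars.isIn_eq_false_iff]
        rw [pvPatS_toList, hfv, hsplit]
        exact pvNoOccScan app_name.toList hctx.1 P
          (fun p hp => hctx.2.1 p (hP p hp))
          (kS.toList.takeWhile (· ≠ ':')) ((kS.toList.dropWhile (· ≠ ':')).tail)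
          hWfree (by rw [← hsplit]; exact hnosfx) cs.length cs le_rfl hnokh
      rw [pvOuter_id app_name fv kS hnin]
      have hres := ih P (fun x hx hx2 => hcf x (List.mem_cons_of_mem _ hx) hx2)
        (fun x hx hx2 => hcol x (List.mem_cons_of_mem _ hx) hx2) hP fv hfv
      rw [hres]
      have hfilter : (kS :: ks').filter (fun xS => ':' ∉ xS.toList)
          = ks'.filter (fun xS => ':' ∉ xS.toList) := by
        rw [List.filter_cons_of_neg (by simpa using hcolk)]
      rw [hfilter]
    · -- colon-free key: one pass of the scan
      have hmem : kS.toList ∈ K := hcf kS List.mem_cons_self hcolk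
      have hpass := pvPass app_name K hctx kS hmem P hP cs hns fv hfv
      have hres := ih (kS.toList :: P) (fun x hx hx2 => hcf x (List.mem_cons_of_mem _ hx) hx2)
        (fun x hx hx2 => hcol x (List.mem_cons_of_mem _ hx) hx2)
        (fun p hp => by
          rcases List.mem_cons.mp hp with h | h
          · rw [h]; exact hmem
          · exact hP p h)
        (pvOuter app_name fv kS) hpass
      rw [hres]
      have hfilter : (kS :: ks').filter (fun xS => ':' ∉ xS.toList)
          = kS :: ks'.filter (fun xS => ':' ∉ xS.toList) := by
        rw [List.filter_cons_of_pos (by simpa using hcolk)]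
      rw [hfilter]
      apply pvScan_congr
      intro x _
      simp only [List.reverse_cons, List.map_append, List.map_cons, List.map_nil,
        List.mem_append, List.mem_cons, List.append_assoc,
        List.mem_map, List.not_mem_nil, or_false, List.mem_reverse]
      try tauto

-- colon-key conversion from Pre_'s string conditions to the list-level facts
theorem pvColonKeyFacts (value app_name : String) (x : String) (hx : ':' ∈ x.toList)
    (h1 : PySem.Str.isIn ("://" ++ String.ofList (x.toList.takeWhile (· ≠ ':')) ++ ":") value = false)
    (h2 : PySem.Str.isIn ("." ++ app_name ++ ".local") x = false) :
    ¬ pvPat (x.toList.takeWhile (· ≠ ':')) <:+: value.toList ∧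
    ¬ pvSfx app_name.toList <:+: x.toList := by
  constructor
  · rw [PySem.Str.isIn_eq, PySem.Chars.isIn_eq_false_iff, pvPatS_toList,
      String.toList_ofList] at h1
    exact h1
  · rw [PySem.Str.isIn_eq, PySem.Chars.isIn_eq_false_iff, pvSuffix_toList] at h2
    exact h2

theorem pvPat_prefix_of_split (W T : List Char) :
    pvPat W <+: pvPat (W ++ ':' :: T) := by
  have : pvPat (W ++ ':' :: T) = [':', '/', '/'] ++ W ++ ':' :: (T ++ [':']) := by
    simp [pvPat]
  rw [this]
  exact pvPat_head_prefix W (T ++ [':'])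

theorem fix_service_references_py_spec : Claim_equal_fix_service_references_py := by
  intro value all_services app_name _hdom hpre
  obtain ⟨hcolon, hbr⟩ := hpre
  unfold Spec_fix_service_references_py
  rw [← String.toList_inj]
  have hkd : ∀ x ∈ (PySem.Dict.ofList all_services).keys, x ∈ all_services.map Prod.fst :=
    pvDictKeys_sub all_services
  -- facts about colon-bearing dict keys, used by both branches
  have hcolH : ∀ x ∈ (PySem.Dict.ofList all_services).keys, ':' ∈ x.toList →
      ¬ pvPat (x.toList.takeWhile (· ≠ ':')) <:+: value.toList ∧
      ¬ pvSfx app_name.toList <:+: x.toList := by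
    intro x hx hcx
    obtain ⟨h1, h2⟩ := hcolon x (hkd x hx) hcx
    exact pvColonKeyFacts value app_name x hcx h1 h2
  rcases hbr with ⟨happf, hmain⟩ | hquiet
  · -- main branch: colon-free keys are scanned, colon keys are inert
    set K := ((all_services.map Prod.fst).map String.toList).filter
      (fun l => ':' ∉ l) with hK
    have hKmem : ∀ l ∈ K, ∃ sS ∈ all_services.map Prod.fst, sS.toList = l ∧ ':' ∉ l := by
      intro l hl
      rw [hK] at hl
      obtain ⟨hmem, hdec⟩ := List.mem_filter.mp hl
      obtain ⟨sS, hsS, rfl⟩ := List.mem_map.mp hmem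
      exact ⟨sS, hsS, rfl, by simpa using hdec⟩
    have hctx : pvCtx app_name.toList K := by
      refine ⟨happf, ?_, ?_⟩
      · intro l hl
        obtain ⟨sS, _, _, hfree⟩ := hKmem l hl
        exact hfree
      · intro k1 h1 k2 h2 heq
        obtain ⟨s1, hs1, rfl, hf1⟩ := hKmem k1 h1
        obtain ⟨s2, hs2, rfl, hf2⟩ := hKmem k2 h2
        apply (hmain s1 hs1 hf1 s2 hs2 hf2).1
        rw [← String.toList_inj, heq]
        simp [String.toList_append, pvSfx]
    have hns : pvNoSh K value.toList := by
      intro k1 h1 k2 h2 hin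
      obtain ⟨s1, hs1, rfl, hf1⟩ := hKmem k1 h1
      obtain ⟨s2, hs2, rfl, hf2⟩ := hKmem k2 h2
      have := (hmain s1 hs1 hf1 s2 hs2 hf2).2
      rw [PySem.Str.isIn_eq, PySem.Chars.isIn_eq_false_iff, pvShared_toList] at this
      exact this hin
    have hA := pvFoldKeys app_name K hctx value.toList hns
      ((PySem.Dict.ofList all_services).keys) []
      (fun x hx hfree => by
        rw [hK]
        refine List.mem_filter.mpr ⟨List.mem_map.mpr ⟨x, hkd x hx, rfl⟩, by simpa using hfree⟩)
      hcolH
      (by simp) value (by rw [pvScan_empty])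
    rw [pvA_eq_fold, hA]
    show _ = (String.ofList (pvScan ((PySem.Set.ofList ((PySem.Dict.ofList all_services).keys)).map
        String.toList) ("." ++ app_name ++ ".local").toList value.toList)).toList
    rw [pvSuffix_toList, String.toList_ofList]
    apply pvScan_congr
    intro x hxfree
    simp only [List.append_nil, List.mem_map, List.mem_reverse, List.mem_filter,
      PySem.Set.mem_ofList]
    constructor
    · rintro ⟨s, ⟨hs, _⟩, rfl⟩
      exact ⟨s, hs, rfl⟩
    · rintro ⟨s, hs, rfl⟩
      exact ⟨s, ⟨hs, by simpa using hxfree⟩, rfl⟩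
  · -- quiet branch: no key matches anywhere, both sides return the value unchanged
    have hnin : ∀ x ∈ (PySem.Dict.ofList all_services).keys,
        ¬ PySem.Str.isIn ("://" ++ x ++ ":") value := by
      intro x hx hisin
      by_cases hcx : ':' ∈ x.toList
      · obtain ⟨hnokh, _⟩ := hcolH x hx hcx
        apply hnokh
        rw [PySem.Str.isIn_eq, PySem.Chars.isIn_iff_infix, pvPatS_toList] at hisin
        obtain ⟨hWfree, hsplit⟩ := pvColonSplit x.toList hcx
        have hpfx : pvPat (x.toList.takeWhile (· ≠ ':')) <+: pvPat x.toList := by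
          conv_rhs => rw [hsplit]
          exact pvPat_prefix_of_split _ _
        exact hpfx.isInfix.trans hisin
      · have := hquiet x (hkd x hx) hcx
        rw [this] at hisin
        simp at hisin
    rw [pvA_eq_fold, pvAfold_id app_name value _ hnin]
    have hBscan : pvScan ((PySem.Set.ofList ((PySem.Dict.ofList all_services).keys)).map
        String.toList) (pvSfx app_name.toList) value.toList = value.toList := by
      apply pvScan_nomatch _ _ value.toList ?_ value.toList.length value.toList le_rfl
        List.suffix_rfl
      intro p hp
      obtain ⟨x, hxmem, rfl⟩ := List.mem_map.mp hp
      rw [PySem.Set.mem_ofList] at hxmem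
      intro hin
      apply hnin x hxmem
      rw [PySem.Str.isIn_eq, PySem.Chars.isIn_iff_infix, pvPatS_toList]
      exact hin
    show _ = (String.ofList (pvScan _ ("." ++ app_name ++ ".local").toList value.toList)).toList
    rw [pvSuffix_toList, String.toList_ofList, hBscan]
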